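-- pv_equiv track=rewrite | github.com/jeelnadaa/SE-Fuzz-Testing | fixed_processor.py | sanitize_string
-- ===== SOURCE A (Python) =====
-- def sanitize_string(data):
--     """
--     Removes special characters and trims the input.
--     Handles None, empty strings, and non-string inputs safely.
--     """
--     if data is None:
--         return ""
--     if not isinstance(data, str):
--         data = str(data)
--
--     data = data.strip()
--     for ch in ['!', '@', '#', '$', '%']:
--         data = data.replace(ch, '')
--     return data
-- ===== SOURCE B (Python) =====
-- def sanitize_string(data):
--     """
--     Removes special characters and trims the input.
--     Handles None, empty strings, and non-string inputs safely.
--     """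
--     if data is None:
--         return ""
--     if not isinstance(data, str):
--         data = str(data)
--     return ''.join(c for c in data.strip() if c not in {'!', '@', '#', '$', '%'})
-- ===== Notes on version B (the rewrite author's own statement) =====
-- stated objective: idiomatic
-- what changed: Replaces the five full-string replace() passes (one per blacklisted character) with a single pass over the stripped string's characters filtering by set membership.
import Mathlib
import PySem

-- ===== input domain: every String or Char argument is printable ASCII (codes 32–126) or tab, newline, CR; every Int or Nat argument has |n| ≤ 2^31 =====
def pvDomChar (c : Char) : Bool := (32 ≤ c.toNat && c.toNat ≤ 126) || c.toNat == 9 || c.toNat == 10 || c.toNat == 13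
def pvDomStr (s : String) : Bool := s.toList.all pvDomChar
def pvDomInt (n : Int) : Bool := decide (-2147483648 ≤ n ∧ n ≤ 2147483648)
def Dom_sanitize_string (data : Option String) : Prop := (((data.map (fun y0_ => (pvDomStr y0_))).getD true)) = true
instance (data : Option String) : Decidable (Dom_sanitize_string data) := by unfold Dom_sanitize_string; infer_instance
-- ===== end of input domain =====

-- B replaces A's five replace() passes (one full scan per blacklisted character)
-- with a single filtering pass over the stripped string's characters (idiomatic).


-- ===== PORT A =====
-- A: None → ""; strip; then one replace(ch, '') per blacklisted character.
def sanitize_string (data : Option String) : String :=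
  match data with
  | none => ""
  | some s =>
    let d := PySem.Str.strip s
    ["!", "@", "#", "$", "%"].foldl (fun d ch => PySem.Str.replace d ch "") d

-- ===== PORT B =====
-- B: None → ""; one pass over the stripped string, keeping chars not in the blacklist.
def sanitize_string_alt (data : Option String) : String :=
  match data with
  | none => ""
  | some s =>
    String.ofList ((PySem.Str.strip s).toList.filter (fun c => !(['!', '@', '#', '$', '%'].contains c)))

-- ===== PRECONDITION & SPEC =====
def Spec_sanitize_string (data : Option String) (out : String) : Prop := out = sanitize_string_alt data
instance (data : Option String) (out : String) : Decidable (Spec_sanitize_string data out) := by unfold Spec_sanitize_string; infer_instance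

-- ===== CLAIM (what is proved, stated in full; the proofs are below) =====
def Claim_equal_sanitize_string : Prop := ∀ (data : Option String), Dom_sanitize_string data → Spec_sanitize_string data (sanitize_string data)

-- ===== LEMMAS AND PROOFS =====

-- replace.go with a one-char pattern and empty replacement filters that char out
lemma replace_go_single (c : Char) :
    ∀ (l : List Char) (fuel : Nat) (acc : List Char), l.length ≤ fuel →
      PySem.Chars.replace.go [c] [] fuel l acc = acc.reverse ++ l.filter (fun a => a ≠ c) := by
  intro l
  induction l with
  | nil =>
    intro fuel acc _
    cases fuel <;> simp [PySem.Chars.replace.go]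
  | cons h t ih =>
    intro fuel acc hle
    cases fuel with
    | zero => simp at hle
    | succ f =>
      simp only [PySem.Chars.replace.go]
      by_cases hc : h = c
      · subst hc
        simp only [List.isPrefixOf, beq_self_eq_true, Bool.true_and, if_true,
          List.reverse_nil, List.nil_append]
        rw [show List.drop [h].length (h :: t) = t by simp]
        rw [ih f acc (by simpa using Nat.le_of_succ_le_succ hle)]
        simp
      · have : List.isPrefixOf [c] (h :: t) = false := by
          simp [List.isPrefixOf]; exact fun e => absurd e.symm hc
        rw [this]
        simp only [Bool.false_eq_true, if_false]
        rw [ih f (h :: acc) (by simpa using Nat.le_of_succ_le_succ hle)]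
        simp [hc]

lemma replace_single (l : List Char) (c : Char) :
    PySem.Chars.replace l [c] [] = l.filter (fun a => a ≠ c) := by
  rw [PySem.Chars.replace]
  simp only [List.isEmpty_cons, Bool.false_eq_true, if_false]
  simpa using replace_go_single c l l.length [] (le_refl _)

lemma str_replace_single (s : String) (c : Char) :
    PySem.Str.replace s (String.ofList [c]) "" = String.ofList (s.toList.filter (fun a => a ≠ c)) := by
  apply String.ext
  rw [PySem.Str.toList_replace]
  simp only [String.toList_ofList, show ("" : String).toList = [] from rfl]
  exact replace_single s.toList c

-- ===== VERDICT (by name: the statement is the Claim_ definition above) =====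
theorem sanitize_string_spec : Claim_equal_sanitize_string := by
  intro data _
  unfold Spec_sanitize_string sanitize_string sanitize_string_alt
  cases data with
  | none => rfl
  | some s =>
    simp only [List.foldl]
    rw [show ("!" : String) = String.ofList ['!'] from rfl,
        show ("@" : String) = String.ofList ['@'] from rfl,
        show ("#" : String) = String.ofList ['#'] from rfl,
        show ("$" : String) = String.ofList ['$'] from rfl,
        show ("%" : String) = String.ofList ['%'] from rfl]
    simp only [str_replace_single, String.toList_ofList, List.filter_filter]
    apply congrArg String.ofList
    apply List.filter_congr
    intro a _
    simp only [List.contains_cons, List.contains_nil, Bool.or_false]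
    by_cases h1 : a = '!' <;> by_cases h2 : a = '@' <;> by_cases h3 : a = '#' <;>
      by_cases h4 : a = '$' <;> by_cases h5 : a = '%' <;> simp [h1, h2, h3, h4, h5]
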